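-- pv_equiv track=rewrite | github.com/pypi-data/pypi-mirror-367 | packages/zmk-glovebox/zmk_glovebox-0.1.0-py3-none-any.whl/glovebox/cli/commands/config/edit.py | parse_comma_separated_fields
-- ===== SOURCE A (Python) =====
-- def parse_comma_separated_fields(field_list: list[str] | None) -> list[str]:
--     """Parse comma-separated field names from a list of strings.
--
--     Args:
--         field_list: List of field specifications, which may contain comma-separated values
--
--     Returns:
--         Flattened list of individual field names
--
--     Examples:
--         ["title,description", "version"] -> ["title", "description", "version"]
--         ["title", "description"] -> ["title", "description"]
--     """
--     if not field_list:
--         return []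
--
--     parsed_fields = []
--     for field_spec in field_list:
--         # Split by comma and strip whitespace
--         fields = [field.strip() for field in field_spec.split(",")]
--         # Filter out empty strings
--         fields = [field for field in fields if field]
--         parsed_fields.extend(fields)
--
--     return parsed_fields
-- ===== SOURCE B (Python) =====
-- def parse_comma_separated_fields(field_list):
--     """Flatten comma-separated field specs into a single list of field names.
--
--     Single-pass character scanner: walks each spec once, maintaining the
--     current token (left-trimmed) and a buffer of pending inner whitespace;
--     a comma (or end of spec) flushes the token if non-empty.  No split/strip.
--     """
--     if not field_list:
--         return []
--     out = []
--     for spec in field_list: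
--         tok = []  # chars of the current token, no leading/trailing whitespace
--         ws = []   # whitespace seen after tok, kept only if more content follows
--         for ch in spec:
--             if ch == ",":
--                 if tok:
--                     out.append("".join(tok))
--                 tok = []
--                 ws = []
--             elif ch.isspace():
--                 if tok:
--                     ws.append(ch)
--             else:
--                 tok.extend(ws)
--                 ws = []
--                 tok.append(ch)
--         if tok:
--             out.append("".join(tok))
--     return out
-- ===== Notes on version B (the rewrite author's own statement) =====
-- stated objective: alternative
-- what changed: Replaces A's split/strip/filter pipeline per spec with a hand-rolled single-pass character scanner that maintains the current token and pending-whitespace buffers explicitly and flushes on comma/end of spec, never calling split or strip.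
import Mathlib
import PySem

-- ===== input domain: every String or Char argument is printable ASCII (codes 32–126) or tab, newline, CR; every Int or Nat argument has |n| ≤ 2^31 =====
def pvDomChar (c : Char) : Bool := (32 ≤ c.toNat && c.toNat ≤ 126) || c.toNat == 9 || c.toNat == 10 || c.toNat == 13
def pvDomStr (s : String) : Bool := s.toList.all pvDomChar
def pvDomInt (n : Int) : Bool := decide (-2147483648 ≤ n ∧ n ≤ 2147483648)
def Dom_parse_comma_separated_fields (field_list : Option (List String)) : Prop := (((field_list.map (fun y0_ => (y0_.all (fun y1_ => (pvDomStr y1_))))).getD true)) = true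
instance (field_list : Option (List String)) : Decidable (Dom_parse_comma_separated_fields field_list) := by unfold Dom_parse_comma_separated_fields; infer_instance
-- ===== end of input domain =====

-- B replaces A's split/strip/filter pipeline by a single-pass character scanner with an
-- explicit (token, pending-whitespace) state that flushes on comma/end of spec (same cost).

-- ===== PORT A =====
def parse_comma_separated_fields (field_list : Option (List String)) : List String :=
  match field_list with
  | none => []
  | some l =>
    if l.isEmpty then []
    else
      l.foldl (fun parsed_fields field_spec =>
        parsed_fields ++
          ((((PySem.Str.split? field_spec ",").getD []).map PySem.Str.strip).filter
            (fun field => !(field == "")))) []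

-- ===== PORT B =====
-- one scanner step: state = (output so far, current token chars, pending whitespace chars)
def pvScanStep (p : List String × List Char × List Char) (ch : Char) :
    List String × List Char × List Char :=
  match p with
  | (out, tok, ws) =>
    if ch = ',' then (if tok.isEmpty then out else out ++ [String.mk tok], [], [])
    else if PySem.Chars.isspace ch then (out, tok, if tok.isEmpty then ws else ws ++ [ch])
    else (out, tok ++ ws ++ [ch], [])

-- end-of-spec flush ('if tok: out.append("".join(tok))')
def pvFinish (p : List String × List Char × List Char) : List String :=
  if p.2.1.isEmpty then p.1 else p.1 ++ [String.mk p.2.1]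

def parse_comma_separated_fields_alt (field_list : Option (List String)) : List String :=
  match field_list with
  | none => []
  | some l =>
    if l.isEmpty then []
    else
      l.foldl (fun out spec => pvFinish (spec.toList.foldl pvScanStep (out, [], []))) []

-- ===== PRECONDITION & SPEC =====
def Spec_parse_comma_separated_fields (field_list : Option (List String)) (out : List String) : Prop := out = parse_comma_separated_fields_alt field_list
instance (field_list : Option (List String)) (out : List String) : Decidable (Spec_parse_comma_separated_fields field_list out) := by unfold Spec_parse_comma_separated_fields; infer_instance

-- ===== CLAIM (what is proved, stated in full; the proofs are below) =====
def Claim_equal_parse_comma_separated_fields : Prop := ∀ (field_list : Option (List String)), Dom_parse_comma_separated_fields field_list → Spec_parse_comma_separated_fields field_list (parse_comma_separated_fields field_list)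

-- ===== LEMMAS AND PROOFS =====

-- clean structural model of PySem.Chars.splitOn with sep = [',']
def pvMySplit : List Char → List Char → List (List Char)
  | [], cur => [cur.reverse]
  | c :: rest, cur => if c = ',' then cur.reverse :: pvMySplit rest [] else pvMySplit rest (c :: cur)

lemma pvGo_eq (fuel : ℕ) : ∀ (l cur : List Char) (acc : List (List Char)), l.length < fuel →
    PySem.Chars.splitOn.go [','] fuel l cur acc = acc.reverse ++ pvMySplit l cur := by
  induction fuel with
  | zero => intro l cur acc h; omega
  | succ n ih =>
    intro l cur acc h
    cases l with
    | nil => rw [PySem.Chars.splitOn.go.eq_def]; simp [pvMySplit]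
    | cons c rest =>
      rw [PySem.Chars.splitOn.go.eq_def]
      by_cases hc : c = ','
      · subst hc
        simp only [List.isPrefixOf, List.length_cons] at *
        simp only [BEq.rfl, Bool.true_and, if_pos]
        rw [show List.drop (List.length ([] : List Char) + 1) (',' :: rest) = rest from rfl]
        rw [ih rest [] _ (by omega)]
        simp [pvMySplit]
      · have : ([','].isPrefixOf (c :: rest)) = false := by
          simp [List.isPrefixOf]; exact fun h' => absurd h'.symm hc
        simp only [this, Bool.false_eq_true, if_false]
        rw [ih rest (c :: cur) acc (by simp at h ⊢; omega)]
        simp [pvMySplit, hc]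

lemma pvSplitOn_eq (s : List Char) : PySem.Chars.splitOn s [','] = pvMySplit s [] := by
  have := pvGo_eq (s.length + 1) s [] [] (by omega)
  simpa [PySem.Chars.splitOn] using this

-- char-level tokens of one spec (what A computes per spec, viewed through toList)
def pvTok (cs : List Char) : List (List Char) :=
  ((PySem.Chars.splitOn cs [',']).map PySem.Chars.strip).filter (fun t => !(t == []))

-- bridge: the Str-level token pipeline, viewed through toList, is pvTok
lemma pvTok_aux : ∀ (ps : List String),
    ((ps.map PySem.Str.strip).filter (fun f => !(f == ""))).map String.toList
      = ((ps.map String.toList).map PySem.Chars.strip).filter (fun t => !(t == [])) := by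
  intro ps
  induction ps with
  | nil => rfl
  | cons s ps ih =>
    by_cases h : PySem.Chars.strip s.toList = []
    · have h' : PySem.Str.strip s = "" := by
        rw [← String.toList_inj, PySem.Str.toList_strip, h]; rfl
      simp [h, h', ih]
    · have h' : PySem.Str.strip s ≠ "" := by
        intro e
        apply h
        rw [← PySem.Str.toList_strip, e]; rfl
      simp [h, h', ih, PySem.Str.toList_strip]

lemma pvStrTok_toList (s : String) :
    ((((PySem.Str.split? s ",").getD []).map PySem.Str.strip).filter (fun f => !(f == ""))).map String.toList
      = pvTok s.toList := by
  have hb := PySem.Str.split?_map s ","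
  have hsep : (",").toList = [','] := rfl
  rw [hsep] at hb
  have hsome : PySem.Chars.split? s.toList [','] = some (PySem.Chars.splitOn s.toList [',']) := by
    simp [PySem.Chars.split?]
  rw [hsome] at hb
  cases e : PySem.Str.split? s "," with
  | none => rw [e] at hb; simp at hb
  | some ps =>
    rw [e] at hb
    simp only [Option.map_some, Option.some_inj] at hb
    simp only [Option.getD_some]
    rw [pvTok_aux, hb]
    rfl

-- A's per-spec result, as mk of char tokens
def pvToksS (cs : List Char) : List String :=
  (((pvMySplit cs []).map PySem.Chars.strip).filter (fun t => !(t == []))).map String.mk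

lemma pvPerSpecA (s : String) :
    ((((PySem.Str.split? s ",").getD []).map PySem.Str.strip).filter (fun f => !(f == "")))
      = pvToksS s.toList := by
  have h := pvStrTok_toList s
  rw [pvTok, pvSplitOn_eq] at h
  apply List.map_injective_iff.mpr (fun a b hab => String.toList_inj.mp hab)
  rw [h, pvToksS, List.map_map]
  have : String.toList ∘ String.mk = id := by
    funext l
    exact String.toList_ofList
  rw [this, List.map_id]

-- the shift lemma: the accumulator only prepends (reversed) onto the FIRST segment
lemma pvMySplit_shift : ∀ (r : List Char), ∃ h t, pvMySplit r [] = h :: t ∧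
    ∀ cur, pvMySplit r cur = (cur.reverse ++ h) :: t := by
  intro r
  induction r with
  | nil => exact ⟨[], [], by simp [pvMySplit], fun cur => by simp [pvMySplit]⟩
  | cons c rest ih =>
    by_cases hc : c = ','
    · subst hc
      exact ⟨[], pvMySplit rest [], by simp [pvMySplit], fun cur => by simp [pvMySplit]⟩
    · obtain ⟨h, t, h1, h2⟩ := ih
      refine ⟨c :: h, t, ?_, fun cur => ?_⟩
      · simpa [pvMySplit, hc] using h2 [c]
      · have := h2 (c :: cur)
        simpa [pvMySplit, hc] using this

-- whitespace facts about strip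
lemma pvLstrip_cons_ws (c : Char) (l : List Char) (hc : PySem.Chars.isspace c = true) :
    PySem.Chars.lstrip (c :: l) = PySem.Chars.lstrip l := by
  simp [PySem.Chars.lstrip, List.dropWhile, hc]

lemma pvStrip_cons_ws (c : Char) (l : List Char) (hc : PySem.Chars.isspace c = true) :
    PySem.Chars.strip (c :: l) = PySem.Chars.strip l := by
  simp [PySem.Chars.strip, pvLstrip_cons_ws c l hc]

lemma pvRstrip_append_ws (a b : List Char) (hb : b.all PySem.Chars.isspace) :
    PySem.Chars.rstrip (a ++ b) = PySem.Chars.rstrip a := by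
  simp only [PySem.Chars.rstrip, List.reverse_append]
  rw [List.dropWhile_append]
  have hrev : b.reverse.all PySem.Chars.isspace := by simpa using hb
  rw [List.all_eq_true] at hb
  simp [hrev]
  intro x hx hxf
  simp [hb x hx] at hxf

lemma pvStrip_inv (tok ws : List Char)
    (h1 : PySem.Chars.lstrip tok = tok) (h3 : ws.all PySem.Chars.isspace)
    (h4 : tok = [] → ws = []) :
    PySem.Chars.strip (tok ++ ws) = PySem.Chars.rstrip tok := by
  cases htok : tok with
  | nil => simp [h4 htok, PySem.Chars.strip, PySem.Chars.lstrip, PySem.Chars.rstrip]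
  | cons c rest =>
    have hc : PySem.Chars.isspace c = false := by
      by_contra hcc
      simp only [Bool.not_eq_false] at hcc
      rw [htok] at h1
      rw [pvLstrip_cons_ws c rest hcc] at h1
      have := congrArg List.length h1
      have hle := List.length_dropWhile_le (p := PySem.Chars.isspace) rest
      simp [PySem.Chars.lstrip] at this hle
      omega
    rw [← htok]
    have hl : PySem.Chars.lstrip (tok ++ ws) = tok ++ ws := by
      rw [htok]
      simp [PySem.Chars.lstrip, List.dropWhile, hc]
    rw [PySem.Chars.strip, hl, pvRstrip_append_ws tok ws h3]

-- rstrip is the identity on a list ending in a non-space char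
lemma pvRstrip_snoc (l : List Char) (c : Char) (hc : PySem.Chars.isspace c = false) :
    PySem.Chars.rstrip (l ++ [c]) = l ++ [c] := by
  simp [PySem.Chars.rstrip, List.dropWhile, hc]

lemma pvLstrip_append (a b : List Char) (ha : PySem.Chars.lstrip a = a) (hne : a ≠ []) :
    PySem.Chars.lstrip (a ++ b) = a ++ b := by
  cases a with
  | nil => exact absurd rfl hne
  | cons c rest =>
    have hc : PySem.Chars.isspace c = false := by
      by_contra hcc
      simp only [Bool.not_eq_false] at hcc
      rw [pvLstrip_cons_ws c rest hcc] at ha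
      have := congrArg List.length ha
      have hle := List.length_dropWhile_le (p := PySem.Chars.isspace) rest
      simp [PySem.Chars.lstrip] at this hle
      omega
    simp [PySem.Chars.lstrip, List.dropWhile, hc]

-- main scanner lemma
lemma pvScan_main : ∀ (cs : List Char) (out : List String) (tok ws : List Char),
    PySem.Chars.lstrip tok = tok → PySem.Chars.rstrip tok = tok →
    ws.all PySem.Chars.isspace → (tok = [] → ws = []) →
    pvFinish (cs.foldl pvScanStep (out, tok, ws))
      = out ++ ((((pvMySplit cs ((tok ++ ws).reverse)).map PySem.Chars.strip).filter
          (fun t => !(t == []))).map String.mk) := by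
  intro cs
  induction cs with
  | nil =>
    intro out tok ws h1 h2 h3 h4
    have hs : PySem.Chars.strip (tok ++ ws) = tok := by rw [pvStrip_inv tok ws h1 h3 h4, h2]
    simp only [List.foldl_nil, pvFinish, pvMySplit, List.reverse_reverse, List.map_cons,
      List.map_nil, hs]
    cases htok : tok with
    | nil => simp
    | cons c rest => simp
  | cons c cs ih =>
    intro out tok ws h1 h2 h3 h4
    by_cases hc : c = ','
    · subst hc
      have hstep : pvScanStep (out, tok, ws) ',' =
          (if tok.isEmpty then out else out ++ [String.mk tok], [], []) := by
        simp [pvScanStep]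
      have hs : PySem.Chars.strip (tok ++ ws) = tok := by rw [pvStrip_inv tok ws h1 h3 h4, h2]
      simp only [List.foldl_cons, hstep]
      rw [ih _ [] [] (by simp [PySem.Chars.lstrip]) (by simp [PySem.Chars.rstrip]) (by simp)
        (fun _ => rfl)]
      simp only [pvMySplit, List.reverse_reverse]
      cases htok : tok with
      | nil =>
        rw [htok] at hs
        simp only [List.nil_append] at hs
        simp [htok, hs]
      | cons a b =>
        rw [htok] at hs
        simp only [List.cons_append] at hs
        simp [htok, hs]
    · by_cases hws : PySem.Chars.isspace c = true
      · by_cases htok : tok = []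
        · have hwsnil : ws = [] := h4 htok
          subst hwsnil
          subst htok
          have hstep : pvScanStep (out, [], []) c = (out, [], []) := by
            simp [pvScanStep, hc, hws]
          simp only [List.foldl_cons, hstep]
          rw [ih out [] [] (by simp [PySem.Chars.lstrip]) (by simp [PySem.Chars.rstrip])
            (by simp) (fun _ => rfl)]
          congr 1
          simp only [pvMySplit, hc, if_false, List.append_nil, List.reverse_nil]
          obtain ⟨h, t, hA, hB⟩ := pvMySplit_shift cs
          rw [hA, hB [c]]
          simp only [List.reverse_cons, List.reverse_nil, List.nil_append, List.map_cons,
            List.singleton_append, List.map_cons]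
          rw [pvStrip_cons_ws c h hws]
        · have hstep : pvScanStep (out, tok, ws) c = (out, tok, ws ++ [c]) := by
            have : tok.isEmpty = false := by simp [htok]
            simp [pvScanStep, hc, hws, this]
          simp only [List.foldl_cons, hstep]
          rw [ih out tok (ws ++ [c]) h1 h2 (by simp [h3, hws])
            (fun he => absurd he htok)]
          congr 2
          rw [show pvMySplit (c :: cs) ((tok ++ ws).reverse) = pvMySplit cs (c :: (tok ++ ws).reverse) from by
            simp [pvMySplit, hc]]
          congr 2
          simp
      · have hstep : pvScanStep (out, tok, ws) c = (out, tok ++ ws ++ [c], []) := by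
          simp [pvScanStep, hc, hws]
        simp only [List.foldl_cons, hstep]
        have hwsf : PySem.Chars.isspace c = false := by
          simpa using hws
        have hl' : PySem.Chars.lstrip (tok ++ ws ++ [c]) = tok ++ ws ++ [c] := by
          cases htok : tok with
          | nil =>
            have : ws = [] := h4 htok
            subst this
            simp [PySem.Chars.lstrip, List.dropWhile, hwsf]
          | cons a b =>
            rw [← htok, List.append_assoc]
            exact pvLstrip_append tok (ws ++ [c]) h1 (by simp [htok])
        rw [ih out (tok ++ ws ++ [c]) [] hl'
          (by rw [pvRstrip_snoc (tok ++ ws) c hwsf]) (by simp) (by simp)]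
        congr 2
        simp only [pvMySplit, hc, if_false]
        congr 1
        simp

-- per-spec result of B's scanner
lemma pvPerSpecB (s : String) (out : List String) :
    pvFinish (s.toList.foldl pvScanStep (out, [], [])) = out ++ pvToksS s.toList := by
  have := pvScan_main s.toList out [] []
    (by simp [PySem.Chars.lstrip]) (by simp [PySem.Chars.rstrip]) (by simp) (fun _ => rfl)
  simpa [pvToksS] using this

-- the two folds over the specs agree
lemma pvFoldEq : ∀ (specs : List String) (acc : List String),
    specs.foldl (fun parsed_fields field_spec =>
        parsed_fields ++
          ((((PySem.Str.split? field_spec ",").getD []).map PySem.Str.strip).filter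
            (fun field => !(field == "")))) acc
      = specs.foldl (fun out spec => pvFinish (spec.toList.foldl pvScanStep (out, [], []))) acc := by
  intro specs
  induction specs with
  | nil => intro acc; rfl
  | cons s rest ih =>
    intro acc
    simp only [List.foldl_cons]
    rw [pvPerSpecA s, pvPerSpecB s acc, ih]

-- ===== VERDICT (by name: the statement is the Claim_ definition above) =====
theorem parse_comma_separated_fields_spec : Claim_equal_parse_comma_separated_fields := by
  intro field_list _
  unfold Spec_parse_comma_separated_fields parse_comma_separated_fields parse_comma_separated_fields_alt
  cases field_list with
  | none => rfl
  | some l =>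
    by_cases hl : l.isEmpty
    · simp [hl]
    · simp only [hl, Bool.false_eq_true, if_false]
      exact pvFoldEq l []
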